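-- pv_equiv track=rewrite | github.com/subrotonpi/clone_transcompiler | storage/data_transpiled/code_jam/16/13/17.py | search
-- ===== SOURCE A (Python) =====
-- def search ( from_id , bffs , likes_me , exclude ) :
--     best = 0
--     for kid in likes_me [ from_id ] :
--         if kid == exclude :
--             continue
--         else :
--             ch = search ( kid , bffs , likes_me , - 1 )
--             if ch > best :
--                 best = ch
--     return best + 1
-- ===== SOURCE B (Python) =====
-- def search(from_id, bffs, likes_me, exclude):
--     # Iterative DFS with an explicit stack carrying the depth forward,
--     # instead of A's post-order recursion combining children's results.
--     best = 0
--     stack = [(from_id, exclude, 1)]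
--     while stack:
--         node, excl, depth = stack.pop()
--         if depth > best:
--             best = depth
--         for kid in likes_me[node]:
--             if kid != excl:
--                 stack.append((kid, -1, depth + 1))
--     return best
-- ===== Notes on version B (the rewrite author's own statement) =====
-- stated objective: alternative
-- what changed: Replaces A's post-order recursion (each call combines the max of its children's recursive results) by an iterative depth-first traversal with an explicit stack that carries the running depth forward and keeps a single global maximum.
import Mathlib
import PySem

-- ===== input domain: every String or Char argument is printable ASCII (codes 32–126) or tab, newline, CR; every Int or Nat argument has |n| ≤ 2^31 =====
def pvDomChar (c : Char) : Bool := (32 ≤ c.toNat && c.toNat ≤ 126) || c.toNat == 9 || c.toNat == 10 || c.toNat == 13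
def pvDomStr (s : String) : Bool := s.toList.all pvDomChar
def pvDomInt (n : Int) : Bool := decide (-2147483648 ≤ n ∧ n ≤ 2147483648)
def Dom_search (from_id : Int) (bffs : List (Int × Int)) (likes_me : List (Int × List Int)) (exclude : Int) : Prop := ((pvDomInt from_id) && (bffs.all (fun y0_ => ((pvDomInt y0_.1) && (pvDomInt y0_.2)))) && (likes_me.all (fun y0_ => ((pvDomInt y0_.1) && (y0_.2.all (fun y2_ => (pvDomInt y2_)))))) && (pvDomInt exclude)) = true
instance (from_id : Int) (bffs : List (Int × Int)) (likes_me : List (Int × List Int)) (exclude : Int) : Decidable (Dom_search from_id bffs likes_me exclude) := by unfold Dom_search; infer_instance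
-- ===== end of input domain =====

-- B replaces A's post-order recursion by an iterative explicit-stack DFS carrying the depth
-- forward; equivalence is proved on the inputs where A returns (Pre_).

-- first-match lookup in the likes_me association list (= Python dict indexing)
def lmGet (lm : List (Int × List Int)) (n : Int) : Option (List Int) :=
  List.lookup n lm

-- ===== PORT A =====
-- the body of A's 'for kid in likes_me[from_id]' loop, with 'go' the recursive call at fuel f
def saLoop (go : Int → Option Int) (ex : Int) : List Int → Int → Option Int
  | [], best => some best
  | kid :: rest, best =>
    if kid = ex then saLoop go ex rest best
    else
      match go kid with
      | none => none
      | some ch => saLoop go ex rest (if ch > best then ch else best)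

-- A's recursion; fuel 'none' = the recursion does not complete (excluded by Pre_)
def searchF (bffs : List (Int × Int)) (lm : List (Int × List Int)) :
    Nat → Int → Int → Option Int
  | 0, _, _ => none
  | f + 1, from_id, ex =>
    match lmGet lm from_id with
    | none => none
    | some kids =>
      match saLoop (fun k => searchF bffs lm f k (-1)) ex kids 0 with
      | none => none
      | some best => some (best + 1)

def search (from_id : Int) (bffs : List (Int × Int)) (likes_me : List (Int × List Int)) (exclude : Int) : Int :=
  (searchF bffs likes_me (likes_me.length + 2) from_id exclude).getD 0

-- ===== PORT B =====
-- 'for kid in likes_me[node]: if kid != excl: stack.append((kid, -1, depth + 1))'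
-- (Python pushes/pops at the list's end; the Lean list's head is that end)
def sbPush (excl d : Int) (kids : List Int) (st : List (Int × Int × Int)) : List (Int × Int × Int) :=
  kids.foldl (fun st k => if k ≠ excl then (k, -1, d + 1) :: st else st) st

-- the largest adjacency-list length, used only to size the fuel of the while loop
def maxKids (lm : List (Int × List Int)) : Nat :=
  lm.foldr (fun p m => Nat.max p.2.length m) 0

-- B's 'while stack:' loop; the fuel only makes it total (proved sufficient under Pre_)
def sbLoop (lm : List (Int × List Int)) : Nat → List (Int × Int × Int) → Int → Option Int
  | _, [], best => some best
  | 0, _ :: _, _ => none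
  | f + 1, (n, e, d) :: rest, best =>
    match lmGet lm n with
    | none => none
    | some kids => sbLoop lm f (sbPush e d kids rest) (if d > best then d else best)

def search_alt (from_id : Int) (bffs : List (Int × Int)) (likes_me : List (Int × List Int)) (exclude : Int) : Int :=
  (sbLoop likes_me ((maxKids likes_me + 1) ^ (likes_me.length + 3))
    [(from_id, exclude, 1)] 0).getD 0

-- ===== PRECONDITION & SPEC =====
-- graph-shape condition, not A's computation (it computes no chain length): okF lm f n says
-- every likes-path from n (edges likes_me[x] minus -1) stays inside the dict's keys and has
-- fewer than f nodes; with f = #entries + 1 this is exactly 'the reachable subgraph is closed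
-- under the keys and acyclic', i.e. the natural domain of a longest-chain function
def okF (lm : List (Int × List Int)) : Nat → Int → Bool
  | 0, _ => false
  | f + 1, n =>
    match lmGet lm n with
    | none => false
    | some kids => kids.all (fun k => k == -1 || okF lm f k)

-- Pre_: exactly where Python A returns (otherwise it raises KeyError or RecursionError):
-- from_id is a key, and the likes-graph walked from its non-excluded kids stays inside the
-- keys and is acyclic (every chain dies within the number of entries).
def Pre_search (from_id : Int) (bffs : List (Int × Int)) (likes_me : List (Int × List Int)) (exclude : Int) : Prop :=
  (lmGet likes_me from_id).isSome = true ∧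
    ∀ k ∈ (lmGet likes_me from_id).getD [],
      k = exclude ∨ okF likes_me (likes_me.length + 1) k = true
instance (from_id : Int) (bffs : List (Int × Int)) (likes_me : List (Int × List Int)) (exclude : Int) : Decidable (Pre_search from_id bffs likes_me exclude) := by unfold Pre_search; infer_instance

def pvWitness_search : Int × (List (Int × Int)) × (List (Int × List Int)) × Int :=
  (1, [], [(1, [2, 3]), (2, [3]), (3, [])], 5)

def Spec_search (from_id : Int) (bffs : List (Int × Int)) (likes_me : List (Int × List Int)) (exclude : Int) (out : Int) : Prop := out = search_alt from_id bffs likes_me exclude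
instance (from_id : Int) (bffs : List (Int × Int)) (likes_me : List (Int × List Int)) (exclude : Int) (out : Int) : Decidable (Spec_search from_id bffs likes_me exclude out) := by unfold Spec_search; infer_instance

-- ===== CLAIM (what is proved, stated in full; the proofs are below) =====
def Claim_equal_search : Prop := ∀ (from_id : Int) (bffs : List (Int × Int)) (likes_me : List (Int × List Int)) (exclude : Int), Dom_search from_id bffs likes_me exclude → Pre_search from_id bffs likes_me exclude → Spec_search from_id bffs likes_me exclude (search from_id bffs likes_me exclude)

-- ===== LEMMAS AND PROOFS =====

-- one-step unfolding of A's recursion (definitional)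
theorem searchF_succ (bffs : List (Int × Int)) (lm : List (Int × List Int)) (f : Nat) (n ex : Int) :
    searchF bffs lm (f + 1) n ex
      = match lmGet lm n with
        | none => none
        | some kids =>
          match saLoop (fun k => searchF bffs lm f k (-1)) ex kids 0 with
          | none => none
          | some best => some (best + 1) := rfl

-- the canonical chain length of a node (value of A's recursion at exclude = -1, big fuel)
def aVal (bffs : List (Int × Int)) (lm : List (Int × List Int)) (n : Int) : Int :=
  (searchF bffs lm (lm.length + 2) n (-1)).getD 0

-- the chain length a stack entry will contribute
def gEnt (bffs : List (Int × Int)) (lm : List (Int × List Int)) (t : Int × Int × Int) : Int :=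
  t.2.2 - 1 + aVal bffs lm t.1

-- what B's loop returns: the max of the running best and every entry's contribution
def stackMax (bffs : List (Int × Int)) (lm : List (Int × List Int)) (st : List (Int × Int × Int)) (b : Int) : Int :=
  st.foldr (fun t m => max (gEnt bffs lm t) m) b

-- size of the DFS tree below n (fuel-truncated); bounds the number of loop iterations
def sizeF (lm : List (Int × List Int)) : Nat → Int → Nat
  | 0, _ => 1
  | f + 1, n =>
    match lmGet lm n with
    | none => 1
    | some kids => 1 + ((kids.filter (fun k => k ≠ -1)).map (sizeF lm f)).sum

def cost (lm : List (Int × List Int)) (st : List (Int × Int × Int)) : Nat :=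
  (st.map (fun t => sizeF lm (lm.length + 2) t.1)).sum

theorem sizeF_some (lm : List (Int × List Int)) (f : Nat) (n : Int) (kids : List Int)
    (hg : lmGet lm n = some kids) :
    sizeF lm (f + 1) n = 1 + ((kids.filter (fun k => k ≠ -1)).map (sizeF lm f)).sum := by
  unfold sizeF; rw [hg]

theorem sbLoop_step (lm : List (Int × List Int)) (f : Nat) (n e d best : Int)
    (rest : List (Int × Int × Int)) (kids : List Int) (hg : lmGet lm n = some kids) :
    sbLoop lm (f + 1) ((n, e, d) :: rest) best
      = sbLoop lm f (sbPush e d kids rest) (if d > best then d else best) := by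
  rw [sbLoop, hg]


theorem okF_mono (lm : List (Int × List Int)) :
    ∀ (f g : Nat) (n : Int), f ≤ g → okF lm f n = true → okF lm g n = true := by
  intro f
  induction f with
  | zero => intro g n _ h; simp [okF] at h
  | succ f ih =>
    intro g n hfg h
    obtain ⟨g', rfl⟩ : ∃ g', g = g' + 1 := ⟨g - 1, by omega⟩
    rcases hg : lmGet lm n with _ | kids
    · simp [okF, hg] at h
    · simp only [okF, hg, List.all_eq_true] at h ⊢
      intro k hk
      rcases Bool.or_eq_true_iff.mp (h k hk) with h1 | h1
      · exact Bool.or_eq_true_iff.mpr (Or.inl h1)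
      · exact Bool.or_eq_true_iff.mpr (Or.inr (ih g' k (by omega) h1))

theorem sizeF_stable (lm : List (Int × List Int)) :
    ∀ (f g : Nat) (n : Int), okF lm f n = true → f ≤ g → sizeF lm g n = sizeF lm f n := by
  intro f
  induction f with
  | zero => intro g n h; simp [okF] at h
  | succ f ih =>
    intro g n h hfg
    obtain ⟨g', rfl⟩ : ∃ g', g = g' + 1 := ⟨g - 1, by omega⟩
    rcases hg : lmGet lm n with _ | kids
    · simp [okF, hg] at h
    · simp only [okF, hg, List.all_eq_true] at h
      rw [sizeF_some lm g' n kids hg, sizeF_some lm f n kids hg]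
      congr 1
      congr 1
      apply List.map_congr_left
      intro k hk
      have hk' := List.mem_filter.mp hk
      have hne : k ≠ (-1 : Int) := by simpa using hk'.2
      rcases Bool.or_eq_true_iff.mp (h k hk'.1) with h1 | h1
      · exact absurd (by exact_mod_cast (beq_iff_eq).mp h1) hne
      · exact ih g' k h1 (by omega)

theorem sizeF_pos (lm : List (Int × List Int)) (f : Nat) (n : Int) : 1 ≤ sizeF lm f n := by
  cases f with
  | zero => simp [sizeF]
  | succ f =>
    unfold sizeF
    rcases lmGet lm n with _ | kids <;> simp

theorem saLoop_some (go : Int → Option Int) (ex : Int) :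
    ∀ (ks : List Int), (∀ k ∈ ks, k = ex ∨ ∃ v, go k = some v) →
    ∀ best, ∃ r, saLoop go ex ks best = some r := by
  intro ks
  induction ks with
  | nil => intro _ best; exact ⟨best, rfl⟩
  | cons kid rest ih =>
    intro h best
    have hk := h kid (by simp)
    by_cases hex : kid = ex
    · simpa [saLoop, hex] using ih (fun k hk => h k (by simp [hk])) best
    · rcases hk with hk | ⟨v, hv⟩
      · exact absurd hk hex
      · rcases ih (fun k hk => h k (by simp [hk])) (if v > best then v else best) with ⟨r, hr⟩
        exact ⟨r, by simp [saLoop, hex, hv, hr]⟩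

theorem sa_some (bffs : List (Int × Int)) (lm : List (Int × List Int)) :
    ∀ (f : Nat) (n : Int), okF lm f n = true →
    ∃ v, searchF bffs lm f n (-1) = some v := by
  intro f
  induction f with
  | zero => intro n h; simp [okF] at h
  | succ f ih =>
    intro n h
    unfold okF at h
    rcases hg : lmGet lm n with _ | kids
    · rw [hg] at h; simp at h
    · rw [hg] at h
      simp only [List.all_eq_true] at h
      have hloop : ∀ k ∈ kids, k = (-1 : Int) ∨ ∃ v, searchF bffs lm f k (-1) = some v := by
        intro k hk
        rcases Bool.or_eq_true_iff.mp (h k hk) with h1 | h1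
        · exact Or.inl (by exact_mod_cast (beq_iff_eq).mp h1)
        · exact Or.inr (ih k h1)
      rcases saLoop_some (fun k => searchF bffs lm f k (-1)) (-1) kids hloop 0 with ⟨r, hr⟩
      exact ⟨r + 1, by simp [searchF, hg, hr]⟩

theorem saLoop_congr (go go' : Int → Option Int) (ex : Int)
    (hgo : ∀ k v, go k = some v → go' k = some v) :
    ∀ (ks : List Int) (best r : Int),
      saLoop go ex ks best = some r → saLoop go' ex ks best = some r := by
  intro ks
  induction ks with
  | nil => intro best r h; simpa [saLoop] using h
  | cons kid rest ih =>
    intro best r h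
    by_cases hex : kid = ex
    · rw [saLoop, if_pos hex] at h ⊢; exact ih best r h
    · rw [saLoop, if_neg hex] at h ⊢
      rcases hgk : go kid with _ | v
      · rw [hgk] at h; simp at h
      · rw [hgk] at h
        rw [hgo kid v hgk]
        exact ih _ r h

theorem sa_mono (bffs : List (Int × Int)) (lm : List (Int × List Int)) :
    ∀ (f g : Nat) (n ex : Int) (v : Int), f ≤ g →
      searchF bffs lm f n ex = some v → searchF bffs lm g n ex = some v := by
  intro f
  induction f with
  | zero => intro g n ex v _ h; simp [searchF] at h
  | succ f ih =>
    intro g n ex v hfg h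
    obtain ⟨g', rfl⟩ : ∃ g', g = g' + 1 := ⟨g - 1, by omega⟩
    rcases hg : lmGet lm n with _ | kids
    · simp [searchF, hg] at h
    · simp only [searchF, hg] at h ⊢
      rcases hl : saLoop (fun k => searchF bffs lm f k (-1)) ex kids 0 with _ | best
      · rw [hl] at h; simp at h
      · rw [hl] at h
        have := saLoop_congr (fun k => searchF bffs lm f k (-1))
          (fun k => searchF bffs lm g' k (-1)) ex
          (fun k w hw => ih g' k (-1) w (by omega) hw) kids 0 best hl
        rw [this]
        exact h

-- okF kids have the canonical value at every sufficient fuel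
theorem aVal_agrees (bffs : List (Int × Int)) (lm : List (Int × List Int))
    (f g : Nat) (k : Int) (h : okF lm f k = true) (hf : f ≤ g) (hf2 : f ≤ lm.length + 2) :
    (searchF bffs lm g k (-1)).getD 0 = aVal bffs lm k := by
  rcases sa_some bffs lm f k h with ⟨v, hv⟩
  have h1 := sa_mono bffs lm f g k (-1) v hf hv
  have h2 := sa_mono bffs lm f (lm.length + 2) k (-1) v hf2 hv
  rw [aVal, h1, h2]

theorem saLoop_val (go : Int → Option Int) (ex : Int) :
    ∀ (ks : List Int) (b r : Int), saLoop go ex ks b = some r →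
      r = ks.foldl (fun b k => if k = ex then b else max b ((go k).getD 0)) b := by
  intro ks
  induction ks with
  | nil =>
    intro b r h
    simp only [saLoop, Option.some_inj] at h
    simpa using h.symm
  | cons kid rest ih =>
    intro b r h
    by_cases hex : kid = ex
    · rw [saLoop, if_pos hex] at h
      simpa [hex] using ih b r h
    · rw [saLoop, if_neg hex] at h
      rcases hgk : go kid with _ | ch
      · rw [hgk] at h; simp at h
      · rw [hgk] at h
        have := ih _ r h
        rw [this]
        simp only [List.foldl_cons, if_neg hex, hgk, Option.getD_some]
        congr 1
        split <;> omega

theorem foldl_shift (a : Int → Int) (ex d : Int) :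
    ∀ (ks : List Int) (b : Int),
      ks.foldl (fun m k => if k = ex then m else max (d + a k) m) (d + b)
        = d + ks.foldl (fun b k => if k = ex then b else max b (a k)) b := by
  intro ks
  induction ks with
  | nil => intro b; simp
  | cons k rest ih =>
    intro b
    simp only [List.foldl_cons]
    by_cases hk : k = ex
    · rw [if_pos hk, if_pos hk]; exact ih b
    · rw [if_neg hk, if_neg hk]
      have : max (d + a k) (d + b) = d + max b (a k) := by omega
      rw [this]; exact ih _

theorem foldl_max_base (c : Int → Int) (ex : Int) :
    ∀ (ks : List Int) (x y : Int),
      ks.foldl (fun m k => if k = ex then m else max (c k) m) (max x y)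
        = max (ks.foldl (fun m k => if k = ex then m else max (c k) m) x) y := by
  intro ks
  induction ks with
  | nil => intro x y; simp
  | cons k rest ih =>
    intro x y
    simp only [List.foldl_cons]
    by_cases hk : k = ex
    · rw [if_pos hk, if_pos hk]; exact ih x y
    · rw [if_neg hk, if_neg hk]
      have : max (c k) (max x y) = max (max (c k) x) y := by omega
      rw [this]; exact ih _ y

theorem sbPush_mem (excl d : Int) :
    ∀ (ks : List Int) (st : List (Int × Int × Int)) (t : Int × Int × Int),
      t ∈ sbPush excl d ks st →
      t ∈ st ∨ ∃ k ∈ ks, k ≠ excl ∧ t = (k, -1, d + 1) := by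
  intro ks
  induction ks with
  | nil => intro st t h; exact Or.inl h
  | cons k rest ih =>
    intro st t h
    rw [sbPush, List.foldl_cons] at h
    rcases ih _ t h with h1 | ⟨k', hk', hne, rfl⟩
    · by_cases hk : k ≠ excl
      · rw [if_pos hk] at h1
        rcases List.mem_cons.mp h1 with rfl | h2
        · exact Or.inr ⟨k, by simp, hk, rfl⟩
        · exact Or.inl h2
      · rw [if_neg hk] at h1; exact Or.inl h1
    · exact Or.inr ⟨k', by simp [hk'], hne, rfl⟩

theorem cost_sbPush (lm : List (Int × List Int)) (excl d : Int) :
    ∀ (ks : List Int) (st : List (Int × Int × Int)),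
      cost lm (sbPush excl d ks st)
        = ((ks.filter (fun k => k ≠ excl)).map (fun k => sizeF lm (lm.length + 2) k)).sum
            + cost lm st := by
  intro ks
  induction ks with
  | nil => intro st; simp [sbPush, cost]
  | cons k rest ih =>
    intro st
    rw [sbPush, List.foldl_cons]
    by_cases hk : k ≠ excl
    · rw [if_pos hk]
      have := ih ((k, -1, d + 1) :: st)
      rw [sbPush] at this
      rw [this]
      have hdk : (decide (k ≠ excl)) = true := by simpa using hk
      simp only [List.filter_cons, hdk, if_pos, List.map_cons, List.sum_cons, cost]
      omega
    · rw [if_neg hk]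
      have := ih st
      rw [sbPush] at this
      rw [this]
      simp only [List.filter_cons]
      simp only [ne_eq, Decidable.not_not] at hk
      simp [hk]

theorem stackMax_sbPush (bffs : List (Int × Int)) (lm : List (Int × List Int)) (excl d : Int) :
    ∀ (ks : List Int) (st : List (Int × Int × Int)) (b : Int),
      stackMax bffs lm (sbPush excl d ks st) b
        = ks.foldl (fun m k => if k = excl then m else max (d + aVal bffs lm k) m)
            (stackMax bffs lm st b) := by
  intro ks
  induction ks with
  | nil => intro st b; simp [sbPush]
  | cons k rest ih =>
    intro st b
    rw [sbPush, List.foldl_cons, List.foldl_cons]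
    by_cases hk : k ≠ excl
    · rw [if_pos hk, if_neg (by exact fun h => hk h)]
      have := ih ((k, -1, d + 1) :: st) b
      rw [sbPush] at this
      rw [this]
      congr 1
      show stackMax bffs lm ((k, -1, d + 1) :: st) b = max (d + aVal bffs lm k) (stackMax bffs lm st b)
      simp only [stackMax, List.foldr_cons, gEnt]
      congr 1
      omega
    · rw [if_neg hk, if_pos (by simpa using hk)]
      have := ih st b
      rw [sbPush] at this
      exact this

theorem stackMax_base (bffs : List (Int × Int)) (lm : List (Int × List Int)) :
    ∀ (st : List (Int × Int × Int)) (b c : Int),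
      stackMax bffs lm st (max b c) = max (stackMax bffs lm st b) c := by
  intro st
  induction st with
  | nil => intro b c; simp [stackMax]
  | cons t rest ih =>
    intro b c
    simp only [stackMax, List.foldr_cons] at *
    rw [ih b c]
    omega

-- aVal's recursive characterisation on ok nodes
theorem aVal_unfold (bffs : List (Int × Int)) (lm : List (Int × List Int)) (n : Int)
    (kids : List Int) (h : okF lm (lm.length + 1) n = true) (hg : lmGet lm n = some kids) :
    aVal bffs lm n
      = 1 + kids.foldl (fun b k => if k = -1 then b else max b (aVal bffs lm k)) 0 := by
  have hL : lm.length + 2 = (lm.length + 1) + 1 := rfl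
  unfold okF at h
  rw [hg] at h
  simp only [List.all_eq_true] at h
  have hkids : ∀ k ∈ kids, k = (-1 : Int) ∨ okF lm (lm.length + 1) k = true := by
    intro k hk
    rcases Bool.or_eq_true_iff.mp (h k hk) with h1 | h1
    · exact Or.inl (by exact_mod_cast (beq_iff_eq).mp h1)
    · exact Or.inr (okF_mono lm (lm.length) (lm.length + 1) k (by omega) h1)
  have hsome : ∀ k ∈ kids, k = (-1 : Int) ∨ ∃ v, searchF bffs lm (lm.length + 1) k (-1) = some v := by
    intro k hk
    rcases hkids k hk with h1 | h1
    · exact Or.inl h1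
    · exact Or.inr (sa_some bffs lm (lm.length + 1) k h1)
  rcases saLoop_some (fun k => searchF bffs lm (lm.length + 1) k (-1)) (-1) kids hsome 0 with ⟨r, hr⟩
  have hval := saLoop_val (fun k => searchF bffs lm (lm.length + 1) k (-1)) (-1) kids 0 r hr
  have : aVal bffs lm n = r + 1 := by
    rw [aVal, hL, searchF_succ, hg]
    simp [hr]
  rw [this, hval]
  have hcong : kids.foldl
      (fun b k => if k = (-1 : Int) then b
        else max b ((searchF bffs lm (lm.length + 1) k (-1)).getD 0)) 0
      = kids.foldl (fun b k => if k = -1 then b else max b (aVal bffs lm k)) 0 := by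
    apply PySem.List.foldl_congr_mem
    intro acc k hk
    by_cases hkx : k = (-1 : Int)
    · simp [hkx]
    · rw [if_neg hkx, if_neg hkx]
      rcases hkids k hk with h1 | h1
      · exact absurd h1 hkx
      · rw [aVal_agrees bffs lm (lm.length + 1) (lm.length + 1) k h1 (le_refl _) (by omega)]
  rw [hcong]
  omega

theorem kidsLen_le (lm : List (Int × List Int)) :
    ∀ (n : Int) (kids : List Int), lmGet lm n = some kids → kids.length ≤ maxKids lm := by
  induction lm with
  | nil => intro n kids h; simp [lmGet, List.lookup] at h
  | cons p rest ih =>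
    intro n kids h
    by_cases hn : (n == p.1) = true
    · rw [lmGet] at h
      simp only [List.lookup, hn] at h
      obtain rfl : p.2 = kids := by simpa using h
      simp [maxKids]
    · rw [lmGet] at h
      simp only [List.lookup, Bool.not_eq_true] at h
      rw [Bool.not_eq_true] at hn
      rw [hn] at h
      have := ih n kids h
      simp only [maxKids, List.foldr_cons]
      calc kids.length ≤ maxKids rest := this
        _ ≤ Nat.max p.2.length (maxKids rest) := Nat.le_max_right _ _
  
theorem sum_le_len_mul (B : Nat) : ∀ (l : List Nat), (∀ x ∈ l, x ≤ B) → l.sum ≤ l.length * B := by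
  intro l
  induction l with
  | nil => intro _; simp
  | cons x rest ih =>
    intro h
    simp only [List.sum_cons, List.length_cons]
    have h1 := h x (by simp)
    have h2 := ih (fun y hy => h y (by simp [hy]))
    calc x + rest.sum ≤ B + rest.length * B := by omega
      _ = (rest.length + 1) * B := by ring

theorem sizeF_le (lm : List (Int × List Int)) :
    ∀ (f : Nat) (n : Int), sizeF lm f n ≤ (maxKids lm + 1) ^ f := by
  intro f
  induction f with
  | zero => intro n; simp [sizeF]
  | succ f ih =>
    intro n
    rcases hg : lmGet lm n with _ | kids
    · simp only [sizeF, hg]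
      exact Nat.one_le_pow _ _ (by omega)
    · rw [sizeF_some lm f n kids hg]
      have hlen : (kids.filter (fun k => k ≠ -1)).length ≤ maxKids lm :=
        le_trans (List.length_filter_le _ _) (kidsLen_le lm n kids hg)
      have hsum : ((kids.filter (fun k => k ≠ -1)).map (sizeF lm f)).sum
          ≤ (kids.filter (fun k => k ≠ -1)).length * (maxKids lm + 1) ^ f := by
        have := sum_le_len_mul ((maxKids lm + 1) ^ f)
          ((kids.filter (fun k => k ≠ -1)).map (sizeF lm f))
          (by intro x hx; rcases List.mem_map.mp hx with ⟨k, _, rfl⟩; exact ih k)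
        simpa using this
      have hpow : (maxKids lm + 1) ^ (f + 1) = (maxKids lm + 1) ^ f + maxKids lm * (maxKids lm + 1) ^ f := by
        ring
      have hone : 1 ≤ (maxKids lm + 1) ^ f := Nat.one_le_pow _ _ (by omega)
      have : (kids.filter (fun k => k ≠ -1)).length * (maxKids lm + 1) ^ f
          ≤ maxKids lm * (maxKids lm + 1) ^ f :=
        Nat.mul_le_mul_right _ hlen
      omega

-- main loop lemma: on a stack of ok nodes (all with excl = -1) B's loop terminates within
-- the cost and returns the max of the running best and every entry's contribution
theorem sbLoop_main (bffs : List (Int × Int)) (lm : List (Int × List Int)) :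
    ∀ (f : Nat) (st : List (Int × Int × Int)) (b : Int),
      (∀ t ∈ st, t.2.1 = -1 ∧ okF lm (lm.length + 1) t.1 = true) →
      cost lm st ≤ f →
      sbLoop lm f st b = some (stackMax bffs lm st b) := by
  intro f
  induction f with
  | zero =>
    intro st b hok hc
    cases st with
    | nil => simp [sbLoop, stackMax]
    | cons t rest =>
      exfalso
      have := sizeF_pos lm (lm.length + 2) t.1
      simp only [cost, List.map_cons, List.sum_cons] at hc
      omega
  | succ f ih =>
    intro st b hok hc
    cases st with
    | nil => simp [sbLoop, stackMax]
    | cons t rest =>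
      obtain ⟨n, e, d⟩ := t
      obtain ⟨he, hokn⟩ := hok (n, e, d) (by simp)
      simp only at he hokn
      subst he
      have hok' := hokn
      unfold okF at hok'
      rcases hg : lmGet lm n with _ | kids
      · rw [hg] at hok'; simp at hok'
      · rw [hg] at hok'
        simp only [List.all_eq_true] at hok'
        have hkids : ∀ k ∈ kids, k = (-1 : Int) ∨ okF lm (lm.length + 1) k = true := by
          intro k hk
          rcases Bool.or_eq_true_iff.mp (hok' k hk) with h1 | h1
          · exact Or.inl (by exact_mod_cast (beq_iff_eq).mp h1)
          · exact Or.inr (okF_mono lm lm.length (lm.length + 1) k (by omega) h1)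
        rw [sbLoop_step lm f n (-1) d b rest kids hg]
        -- the pushed stack still consists of ok nodes
        have hok2 : ∀ t ∈ sbPush (-1) d kids rest, t.2.1 = -1 ∧ okF lm (lm.length + 1) t.1 = true := by
          intro t ht
          rcases sbPush_mem (-1) d kids rest t ht with h1 | ⟨k, hk, hne, rfl⟩
          · exact hok t (by simp [h1])
          · refine ⟨rfl, ?_⟩
            rcases hkids k hk with h1 | h1
            · exact absurd h1 hne
            · exact h1
        -- its cost dropped by one
        have hc2 : cost lm (sbPush (-1) d kids rest) ≤ f := by
          rw [cost_sbPush]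
          have hsz : sizeF lm (lm.length + 2) n
              = 1 + ((kids.filter (fun k => k ≠ -1)).map (fun k => sizeF lm (lm.length + 2) k)).sum := by
            have hst := sizeF_stable lm (lm.length + 1) (lm.length + 2) n hokn (by omega)
            rw [hst, sizeF_some lm lm.length n kids hg]
            congr 1
            congr 1
            apply List.map_congr_left
            intro k hk
            have hk' := List.mem_filter.mp hk
            have hne : k ≠ (-1 : Int) := by simpa using hk'.2
            have hks : okF lm lm.length k = true := by
              rcases Bool.or_eq_true_iff.mp (hok' k hk'.1) with h1 | h1
              · exact absurd (by exact_mod_cast (beq_iff_eq).mp h1) hne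
              · exact h1
            exact (sizeF_stable lm lm.length (lm.length + 2) k hks (by omega)).symm
          simp only [cost, List.map_cons, List.sum_cons] at hc
          simp only [cost]
          omega
        rw [ih (sbPush (-1) d kids rest) (if d > b then d else b) hok2 hc2]
        congr 1
        -- the value matches the declarative stackMax
        rw [stackMax_sbPush]
        have hb' : (if d > b then d else b) = max b d := by
          split <;> omega
        rw [hb', stackMax_base]
        have hfold := foldl_max_base (fun k => d + aVal bffs lm k) (-1) kids d (stackMax bffs lm rest b)
        rw [max_comm (stackMax bffs lm rest b) d, hfold]
        have hshift : kids.foldl (fun m k => if k = (-1 : Int) then m else max (d + aVal bffs lm k) m) d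
            = d + kids.foldl (fun b k => if k = (-1 : Int) then b else max b (aVal bffs lm k)) 0 := by
          have := foldl_shift (aVal bffs lm) (-1) d kids 0
          simpa using this
        rw [hshift]
        have hA := aVal_unfold bffs lm n kids hokn hg
        simp only [stackMax, List.foldr_cons, gEnt]
        generalize kids.foldl (fun b k => if k = (-1 : Int) then b else max b (aVal bffs lm k)) 0 = X at hA ⊢
        generalize stackMax bffs lm rest b = S
        rw [hA]
        omega

-- ===== VERDICT (by name: the statement is the Claim_ definition above) =====
theorem search_spec : Claim_equal_search := by
  intro from_id bffs likes_me exclude _ hpre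
  rcases hpre with ⟨hsome, hkid⟩
  unfold Spec_search search search_alt
  rcases hg : lmGet likes_me from_id with _ | kids
  · rw [hg] at hsome; simp at hsome
  · rw [hg] at hkid
    simp only [Option.getD_some] at hkid
    -- A's value
    have hsomek : ∀ k ∈ kids, k = exclude ∨ ∃ v, searchF bffs likes_me (likes_me.length + 1) k (-1) = some v := by
      intro k hk
      rcases hkid k hk with h1 | h1
      · exact Or.inl h1
      · exact Or.inr (sa_some bffs likes_me (likes_me.length + 1) k h1)
    rcases saLoop_some (fun k => searchF bffs likes_me (likes_me.length + 1) k (-1)) exclude kids hsomek 0 with ⟨r, hr⟩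
    have hval := saLoop_val (fun k => searchF bffs likes_me (likes_me.length + 1) k (-1)) exclude kids 0 r hr
    have hL : likes_me.length + 2 = (likes_me.length + 1) + 1 := rfl
    have hA : (searchF bffs likes_me (likes_me.length + 2) from_id exclude).getD 0 = r + 1 := by
      rw [hL, searchF_succ, hg]
      simp [hr]
    have hcong : kids.foldl
        (fun b k => if k = exclude then b
          else max b ((searchF bffs likes_me (likes_me.length + 1) k (-1)).getD 0)) 0
        = kids.foldl (fun b k => if k = exclude then b else max b (aVal bffs likes_me k)) 0 := by
      apply PySem.List.foldl_congr_mem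
      intro acc k hk
      by_cases hkx : k = exclude
      · simp [hkx]
      · rw [if_neg hkx, if_neg hkx]
        rcases hkid k hk with h1 | h1
        · exact absurd h1 hkx
        · rw [aVal_agrees bffs likes_me (likes_me.length + 1) (likes_me.length + 1) k h1 (le_refl _) (by omega)]
    -- B's value
    obtain ⟨F, hF⟩ : ∃ F, (maxKids likes_me + 1) ^ (likes_me.length + 3) = F + 1 :=
      ⟨(maxKids likes_me + 1) ^ (likes_me.length + 3) - 1,
        by have := Nat.one_le_pow (likes_me.length + 3) (maxKids likes_me + 1) (by omega); omega⟩
    rw [hF]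
    rw [sbLoop_step likes_me F from_id exclude 1 0 [] kids hg]
    have hok2 : ∀ t ∈ sbPush exclude 1 kids [], t.2.1 = -1 ∧ okF likes_me (likes_me.length + 1) t.1 = true := by
      intro t ht
      rcases sbPush_mem exclude 1 kids [] t ht with h1 | ⟨k, hk, hne, rfl⟩
      · simp at h1
      · refine ⟨rfl, ?_⟩
        rcases hkid k hk with h1 | h1
        · exact absurd h1 hne
        · exact h1
    have hc2 : cost likes_me (sbPush exclude 1 kids []) ≤ F := by
      rw [cost_sbPush]
      have hsum : ((kids.filter (fun k => k ≠ exclude)).map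
          (fun k => sizeF likes_me (likes_me.length + 2) k)).sum
          ≤ maxKids likes_me * (maxKids likes_me + 1) ^ (likes_me.length + 2) := by
        have h1 := sum_le_len_mul ((maxKids likes_me + 1) ^ (likes_me.length + 2))
          ((kids.filter (fun k => k ≠ exclude)).map (fun k => sizeF likes_me (likes_me.length + 2) k))
          (by intro x hx; rcases List.mem_map.mp hx with ⟨k, _, rfl⟩; exact sizeF_le likes_me _ k)
        have h2 : ((kids.filter (fun k => k ≠ exclude)).map
            (fun k => sizeF likes_me (likes_me.length + 2) k)).length ≤ maxKids likes_me := by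
          simp only [List.length_map]
          exact le_trans (List.length_filter_le _ _) (kidsLen_le likes_me from_id kids hg)
        calc ((kids.filter (fun k => k ≠ exclude)).map
              (fun k => sizeF likes_me (likes_me.length + 2) k)).sum
            ≤ _ * (maxKids likes_me + 1) ^ (likes_me.length + 2) := h1
          _ ≤ maxKids likes_me * (maxKids likes_me + 1) ^ (likes_me.length + 2) :=
              Nat.mul_le_mul_right _ h2
      have hpow : (maxKids likes_me + 1) ^ (likes_me.length + 3)
          = (maxKids likes_me + 1) ^ (likes_me.length + 2)
            + maxKids likes_me * (maxKids likes_me + 1) ^ (likes_me.length + 2) := by ring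
      have hone : 1 ≤ (maxKids likes_me + 1) ^ (likes_me.length + 2) :=
        Nat.one_le_pow _ _ (by omega)
      simp only [cost, List.map_nil, List.sum_nil]
      omega
    rw [sbLoop_main bffs likes_me F (sbPush exclude 1 kids []) _ hok2 hc2]
    rw [stackMax_sbPush]
    rw [if_pos (by norm_num)]
    have hbase : stackMax bffs likes_me [] (1 : Int) = 1 := by simp [stackMax]
    rw [hbase]
    have hshift : kids.foldl (fun m k => if k = exclude then m else max (1 + aVal bffs likes_me k) m) 1
        = 1 + kids.foldl (fun b k => if k = exclude then b else max b (aVal bffs likes_me k)) 0 := by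
      have := foldl_shift (aVal bffs likes_me) exclude 1 kids 0
      simpa using this
    rw [hA, hval, hcong]
    simp only [Option.getD_some]
    rw [hshift]
    omega
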